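-- pv_equiv track=rewrite | github.com/leeyang1991/PhD_Thesis | Chapter5/analysis.py | __pick_single_events
-- ===== SOURCE A (Python) =====
-- def __pick_single_events(drought_year_list):
--     n = 4
--     single_events_list = []
--     for i in range(len(drought_year_list)):
--         year = drought_year_list[i]
--         if i - 1 < 0:  # first drought event
--             if len(drought_year_list) == 1:
--                 single_events_list.append(year)
--                 break
--             if year + n <= drought_year_list[i + 1]:
--                 single_events_list.append(year)
--             continue
--         if i + 1 >= len(drought_year_list):  # the last drought event
--             if drought_year_list[i] - drought_year_list[i - 1] >= n:
--                 single_events_list.append(drought_year_list[i])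
--             break
--         if drought_year_list[i] - drought_year_list[i - 1] >= n and drought_year_list[i] + n <= drought_year_list[
--             i + 1]:  # middle drought events
--             single_events_list.append(drought_year_list[i])
--     return single_events_list
-- ===== SOURCE B (Python) =====
-- def __pick_single_events(drought_year_list):
--     n = len(drought_year_list)
--     isolated = [True] * n
--     for i in range(n - 1):
--         if drought_year_list[i + 1] - drought_year_list[i] < 4:
--             isolated[i] = False
--             isolated[i + 1] = False
--     return [year for i, year in enumerate(drought_year_list) if isolated[i]]
-- ===== Notes on version B (the rewrite author's own statement) =====
-- stated objective: alternative
-- what changed: A's three-branch per-index neighbour lookahead (with first/last special cases and break/continue) is replaced by a pair-elimination boolean mask: one pass over consecutive gaps marks both endpoints of any gap < 4 as non-isolated, then the kept years are read off the mask in order.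
import Mathlib
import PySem

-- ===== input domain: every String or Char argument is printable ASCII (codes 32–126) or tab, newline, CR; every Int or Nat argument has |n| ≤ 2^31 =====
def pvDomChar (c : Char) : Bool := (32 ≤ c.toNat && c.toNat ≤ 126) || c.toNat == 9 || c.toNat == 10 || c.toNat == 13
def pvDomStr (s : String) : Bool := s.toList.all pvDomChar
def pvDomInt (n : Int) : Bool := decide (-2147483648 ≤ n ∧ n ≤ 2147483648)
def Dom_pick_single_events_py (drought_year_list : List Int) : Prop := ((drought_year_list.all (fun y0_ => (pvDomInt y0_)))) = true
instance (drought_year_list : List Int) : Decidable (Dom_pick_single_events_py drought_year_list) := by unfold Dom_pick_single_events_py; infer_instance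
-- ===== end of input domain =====

-- B replaces A's three-branch per-index neighbour lookahead with a pair-elimination boolean
-- mask over consecutive gaps: an alternative decomposition of the same O(n) task.

-- list indexing l[i] for an index the loops only use in range (the default 0 is never read)
def pvGet (l : List Int) (i : Nat) : Int := l.getD i 0

-- ===== PORT A =====
-- A's for-loop over indices, with `break` ported as returning the accumulator
def pickLoop (l : List Int) (i : Nat) (acc : List Int) : List Int :=
  if _h : i < l.length then
    if i = 0 then
      if l.length = 1 then acc ++ [pvGet l 0]   -- append, then break
      else
        pickLoop l (i + 1)
          (if pvGet l i + 4 ≤ pvGet l (i + 1) then acc ++ [pvGet l i] else acc)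
    else if i + 1 ≥ l.length then   -- the last drought event: maybe append, then break
      if pvGet l i - pvGet l (i - 1) ≥ 4 then acc ++ [pvGet l i] else acc
    else
      pickLoop l (i + 1)
        (if pvGet l i - pvGet l (i - 1) ≥ 4 ∧ pvGet l i + 4 ≤ pvGet l (i + 1)
         then acc ++ [pvGet l i] else acc)
  else acc
termination_by l.length - i
decreasing_by all_goals omega

def pick_single_events_py (drought_year_list : List Int) : List Int :=
  pickLoop drought_year_list 0 []

-- ===== PORT B =====
def pick_single_events_py_alt (drought_year_list : List Int) : List Int :=
  let n := drought_year_list.length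
  let isolated :=
    (List.range (n - 1)).foldl
      (fun m i =>
        if pvGet drought_year_list (i + 1) - pvGet drought_year_list i < 4 then
          (m.set i false).set (i + 1) false
        else m)
      (List.replicate n true)
  (((List.range n).zip drought_year_list).filter
      (fun p => isolated.getD p.1 false)).map (fun p => p.2)

-- ===== PRECONDITION & SPEC =====
def Spec_pick_single_events_py (drought_year_list : List Int) (out : List Int) : Prop := out = pick_single_events_py_alt drought_year_list
instance (drought_year_list : List Int) (out : List Int) : Decidable (Spec_pick_single_events_py drought_year_list out) := by unfold Spec_pick_single_events_py; infer_instance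

-- ===== CLAIM (what is proved, stated in full; the proofs are below) =====
def Claim_equal_pick_single_events_py : Prop := ∀ (drought_year_list : List Int), Dom_pick_single_events_py drought_year_list → Spec_pick_single_events_py drought_year_list (pick_single_events_py drought_year_list)

-- ===== LEMMAS AND PROOFS =====

-- the common characterisation: index i is kept iff its left gap (if any) and right gap (if any) are ≥ 4
def pvCond (l : List Int) (i : Nat) : Bool :=
  (decide (i = 0) || decide (pvGet l i - pvGet l (i - 1) ≥ 4)) &&
  (decide (i + 1 = l.length) || decide (pvGet l i + 4 ≤ pvGet l (i + 1)))

def pvSpec (l : List Int) : List Int :=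
  ((List.range l.length).filter (pvCond l)).map (pvGet l)

-- the mask entry j of B after the first k pair-steps
def pvMask (l : List Int) (k : Nat) (j : Nat) : Bool :=
  !(decide (1 ≤ j ∧ j - 1 < k ∧ pvGet l j - pvGet l (j - 1) < 4) ||
    decide (j < k ∧ pvGet l (j + 1) - pvGet l j < 4))

theorem pickLoop_eq (l : List Int) :
    ∀ k i acc, 1 ≤ i → l.length - i = k →
      pickLoop l i acc = acc ++ ((List.range' i (l.length - i)).filter (pvCond l)).map (pvGet l) := by
  intro k
  induction k with
  | zero =>
    intro i acc hi hk
    unfold pickLoop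
    rw [dif_neg (by omega)]
    simp [hk]
  | succ k ih =>
    intro i acc hi hk
    have hlt : i < l.length := by omega
    unfold pickLoop
    rw [dif_pos hlt, if_neg (by omega : ¬ i = 0)]
    by_cases hlast : i + 1 ≥ l.length
    · rw [if_pos hlast]
      have h1 : l.length - i = 1 := by omega
      rw [h1]
      have hc : pvCond l i = decide (pvGet l i - pvGet l (i - 1) ≥ 4) := by
        simp [pvCond, show ¬ i = 0 by omega, show i + 1 = l.length by omega]
      by_cases hd : pvGet l i - pvGet l (i - 1) ≥ 4
      · rw [if_pos hd]; simp [List.range', hc, hd]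
      · rw [if_neg hd]; simp [List.range', hc, hd]
    · rw [if_neg hlast]
      rw [ih (i + 1) _ (by omega) (by omega)]
      rw [show l.length - (i + 1) = k from by omega,
          show l.length - i = k + 1 from hk, List.range'_succ, List.filter_cons]
      have hc : pvCond l i
          = decide (pvGet l i - pvGet l (i - 1) ≥ 4 ∧ pvGet l i + 4 ≤ pvGet l (i + 1)) := by
        simp [pvCond, show ¬ i = 0 by omega, show ¬ (i + 1 = l.length) by omega]
      by_cases hd : pvGet l i - pvGet l (i - 1) ≥ 4 ∧ pvGet l i + 4 ≤ pvGet l (i + 1)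
      · rw [if_pos hd]; simp [hc, hd]
      · rw [if_neg hd]; simp [hc, hd]

theorem pickA_eq_spec (l : List Int) : pick_single_events_py l = pvSpec l := by
  unfold pick_single_events_py pvSpec
  by_cases h0 : l.length = 0
  · unfold pickLoop; rw [dif_neg (by omega)]; simp [h0]
  · by_cases h1 : l.length = 1
    · unfold pickLoop
      rw [dif_pos (by omega), if_pos rfl, if_pos h1]
      simp [h1, pvCond]
    · obtain ⟨m, hm⟩ : ∃ m, l.length = m + 2 := ⟨l.length - 2, by omega⟩
      unfold pickLoop
      rw [dif_pos (by omega), if_pos rfl, if_neg h1]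
      rw [pickLoop_eq l (l.length - 1) 1 _ (by omega) rfl]
      have hr : List.range l.length = 0 :: List.range' 1 (l.length - 1) := by
        rw [List.range_eq_range', hm, show m + 2 = (m + 1) + 1 from rfl, List.range'_succ]
        simp [show m + 2 - 1 = m + 1 from by omega]
      rw [hr, List.filter_cons]
      have hc : pvCond l 0 = decide (pvGet l 0 + 4 ≤ pvGet l (0 + 1)) := by
        simp [pvCond, show ¬ ((0:Nat) + 1 = l.length) from by omega]
      by_cases hd : pvGet l 0 + 4 ≤ pvGet l (0 + 1)
      · rw [if_pos hd]; simp [hc, hd]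
      · rw [if_neg hd]; simp [hc, hd]

-- mask entries only change at a pair-step that touches them
lemma pvMask_pointwise (l : List Int) (k j : Nat)
    (h : j = k + 1 → ¬ pvGet l (k + 1) - pvGet l k < 4)
    (h2 : j = k → ¬ pvGet l (k + 1) - pvGet l k < 4) :
    pvMask l k j = pvMask l (k + 1) j := by
  rw [Bool.eq_iff_iff]
  simp only [pvMask, Bool.or_eq_false_iff, decide_eq_false_iff_not, Bool.not_eq_true']
  constructor
  · rintro ⟨a, b⟩
    refine ⟨fun ⟨x1, x2, x3⟩ => ?_, fun ⟨y1, y2⟩ => ?_⟩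
    · rcases Nat.lt_or_ge (j - 1) k with hlt | hge
      · exact a ⟨x1, hlt, x3⟩
      · have hj : j = k + 1 := by omega
        subst hj
        exact absurd x3 (by simpa using h rfl)
    · rcases Nat.lt_or_ge j k with hlt | hge
      · exact b ⟨hlt, y2⟩
      · have hj : j = k := by omega
        subst hj
        exact absurd y2 (h2 rfl)
  · rintro ⟨a, b⟩
    exact ⟨fun ⟨x1, x2, x3⟩ => a ⟨x1, by omega, x3⟩, fun ⟨y1, y2⟩ => b ⟨by omega, y2⟩⟩

theorem mask_fold_eq (l : List Int) :
    ∀ k, k ≤ l.length - 1 →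
      (List.range k).foldl
        (fun m i =>
          if pvGet l (i + 1) - pvGet l i < 4 then (m.set i false).set (i + 1) false else m)
        (List.replicate l.length true)
      = (List.range l.length).map (fun j => pvMask l k j) := by
  intro k
  induction k with
  | zero =>
    intro _
    apply List.ext_getElem (by simp)
    intro j h1 h2
    simp [pvMask]
  | succ k ih =>
    intro hk
    rw [List.range_succ, List.foldl_append, ih (by omega)]
    simp only [List.foldl_cons, List.foldl_nil]
    by_cases hd : pvGet l (k + 1) - pvGet l k < 4
    · rw [if_pos hd]
      apply List.ext_getElem (by simp)
      intro j h1 h2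
      simp only [List.getElem_set, List.getElem_map, List.getElem_range]
      split_ifs with e1 e2
      · subst e1
        simp [pvMask, hd]
      · subst e2
        simp [pvMask, hd]
      · exact pvMask_pointwise l k j (fun hj => absurd hj.symm e1) (fun hj => absurd hj.symm e2)
    · rw [if_neg hd]
      apply List.map_congr_left
      intro j _
      exact pvMask_pointwise l k j (fun _ => hd) (fun _ => hd)

theorem mask_eq_cond (l : List Int) (j : Nat) (hj : j < l.length) :
    pvMask l (l.length - 1) j = pvCond l j := by
  rw [Bool.eq_iff_iff]
  simp only [pvMask, pvCond, Bool.not_eq_true', Bool.or_eq_false_iff, Bool.and_eq_true,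
    Bool.or_eq_true, decide_eq_false_iff_not, decide_eq_true_eq]
  omega

theorem pickB_eq_spec (l : List Int) : pick_single_events_py_alt l = pvSpec l := by
  simp only [pick_single_events_py_alt]
  rw [mask_fold_eq l (l.length - 1) (by omega)]
  have hzip : (List.range l.length).zip l = (List.range l.length).map (fun j => (j, pvGet l j)) := by
    apply List.ext_getElem (by simp)
    intro j h1 h2
    have hjl : j < l.length := by simpa using h1
    simp [pvGet, List.getElem?_eq_getElem hjl]
  rw [hzip, List.filter_map, List.map_map]
  unfold pvSpec
  refine (congrArg _ (List.filter_congr ?_)).trans rfl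
  intro j hj
  have hjn : j < l.length := List.mem_range.mp hj
  have hlen : j < ((List.range l.length).map (fun j => pvMask l (l.length - 1) j)).length := by
    simpa using hjn
  show ((List.range l.length).map (fun j => pvMask l (l.length - 1) j)).getD j false = pvCond l j
  rw [List.getD_eq_getElem _ _ hlen]
  simpa using mask_eq_cond l j hjn

-- ===== VERDICT (by name: the statement is the Claim_ definition above) =====
theorem pick_single_events_py_spec : Claim_equal_pick_single_events_py := by
  intro l _
  unfold Spec_pick_single_events_py
  rw [pickA_eq_spec, pickB_eq_spec]
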